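-- pv_equiv track=rewrite | github.com/dtote/Kyber-API | kypher.py | decode_matrix
-- ===== SOURCE A (Python) =====
-- def bytes2bits(input_bytes):
--     """
--     Convierte los bytes a un array de bits.
--     Se utiliza una notación en little-endian, es decir, el bit menos significativo es el primero.
--     """
--     bit_string = ''.join(format(byte, '08b')[::-1] for byte in input_bytes)
--     return list(map(int, list(bit_string)))
--
-- def decode(input_bytes, l=None):
--         """
--         Decode (Algorithm 3)
--
--         decode: B^32l -> R_q
--         """
--         n, q = 256,3329
--         if l is None:
--             l, r = divmod(8*len(input_bytes),n) # Aqui comprobamos que el resto r es 0, es decir que es divisible por n, es decir que len(input_bytes) es múltiplo de 32.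
--             if r != 0:
--                 raise ValueError("La lista de bytes de entrada debe tener una longitud multiplo de 32")
--         else:
--             if n*l!=len(input_bytes)*8:
--                 raise ValueError("La lista de bytes de entrada debe tener una longitud multiplo de 32")
--         coefficients = [0 for _ in range(n)]
--         list_of_bits = bytes2bits(input_bytes)
--         for i in range(n):
--             coefficients[i] = sum(list_of_bits[i*l + j] << j for j in range(l)) # el << j mueve los bits j veces a la izquierda.
--         return coefficients
--
-- def decode_matrix(input_bytes, m_fil, n_col, l=None):
--   """
--   Debido al requerimiento de tamaño n*l = 8*len(pol o bytes) hacemos una función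
--   para hacer la descodficiación de una lista de listas de polinomios. (matriz).
--   """
--   n=256
--   if l is None:
--     # Tamaño de lista debe ser 32*l*m_fil*n_col
--     l, check = divmod(8*len(input_bytes), n*m_fil*n_col)
--     if check != 0:
--       raise ValueError("La longitud del input de bytes debe ser multiplo de 32.")
--     else:
--       if n*l*m_fil*n_col > len(input_bytes)*8:
--         raise ValueError("La longitud de bytes es pequeña para el l dado.")
--   chunk_length = 32*l
--   byte_chunks = [input_bytes[i:i+chunk_length] for i in range(0, len(input_bytes), chunk_length)]
--   matrix = [[0 for _ in range(n_col)] for _ in range(m_fil)]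
--   for i in range(m_fil):
--     for j in range(n_col):
--       matrix[i][j] = decode(byte_chunks[n_col*i+j], l)
--   return matrix
-- ===== SOURCE B (Python) =====
-- def decode_matrix(input_bytes, m_fil, n_col, l=None):
--   n = 256
--   if l is None:
--     total_bits = 8 * len(input_bytes)
--     groups = n * m_fil * n_col
--     l = total_bits // groups
--     if total_bits % groups or n * l * m_fil * n_col > total_bits:
--       raise ValueError("La longitud del input de bytes no es valida.")
--   if m_fil <= 0 or n_col <= 0:
--     # trivial sizes: no chunk holds any data
--     return [[] for _ in range(m_fil)]
--   # one big little-endian integer over the used prefix; every coefficient is a shift/mask field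
--   X = int.from_bytes(bytes(input_bytes[:32 * l * m_fil * n_col]), 'little')
--   mask = (1 << l) - 1
--   flat = [(X >> (k * l)) & mask for k in range(n * m_fil * n_col)]
--   return [[flat[(n_col * i + j) * n:(n_col * i + j + 1) * n] for j in range(n_col)]
--           for i in range(m_fil)]
-- ===== Notes on version B (the rewrite author's own statement) =====
-- stated objective: alternative
-- what changed: B keeps A's validation but drops the chunk-by-chunk decode entirely: after a trivial-size early return it builds one little-endian big integer over the used byte prefix, extracts a flat list of all m_fil*n_col*256 coefficients by global shift/mask, and reshapes that flat list into the matrix by slicing.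
import Mathlib
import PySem

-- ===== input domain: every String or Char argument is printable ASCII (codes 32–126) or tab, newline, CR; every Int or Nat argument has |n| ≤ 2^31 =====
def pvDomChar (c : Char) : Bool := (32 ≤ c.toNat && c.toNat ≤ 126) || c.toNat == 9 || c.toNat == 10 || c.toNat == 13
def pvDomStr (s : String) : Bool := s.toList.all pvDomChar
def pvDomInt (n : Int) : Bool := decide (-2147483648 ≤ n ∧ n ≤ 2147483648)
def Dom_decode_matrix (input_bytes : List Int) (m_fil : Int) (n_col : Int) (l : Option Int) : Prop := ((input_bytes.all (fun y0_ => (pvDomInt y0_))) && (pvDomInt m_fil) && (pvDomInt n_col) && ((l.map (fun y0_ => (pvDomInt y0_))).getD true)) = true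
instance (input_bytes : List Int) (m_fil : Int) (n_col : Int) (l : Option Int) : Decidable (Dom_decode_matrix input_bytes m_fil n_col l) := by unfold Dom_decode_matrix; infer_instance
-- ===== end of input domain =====

-- B replaces A's per-chunk bit-array decode (bytes2bits + per-coefficient bit sums over 32-byte
-- chunks) by ONE little-endian big integer over the whole used prefix: a flat list of all
-- m_fil*n_col*256 coefficients is extracted by global shift/mask and then reshaped by slicing.

-- ===== PORT A =====

-- format(byte,'08b')[::-1] as a list of 0/1 ints: exact for 0 ≤ byte ≤ 255 (guaranteed by Pre_ wherever evaluated)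
def pvBits8 (b : Int) : List Int := (List.range 8).map (fun j => b / 2 ^ j % 2)

-- bytes2bits: ''.join over the bytes, then list(map(int, ...))
def pvBytes2bits (bs : List Int) : List Int := bs.flatMap pvBits8

-- decode(input_bytes, l) with l always given (decode_matrix always passes it); the ValueError
-- path returns [] (unreachable under Pre_); in-range index via getD (in range under Pre_)
def pvDecodeA (input_bytes : List Int) (l : Int) : List Int :=
  if 256 * l ≠ 8 * (input_bytes.length : Int) then []
  else
    let bits := pvBytes2bits input_bytes
    (List.range 256).map (fun i =>
      (List.range l.toNat).foldl (fun acc j => acc + bits.getD (i * l.toNat + j) 0 * 2 ^ j) 0)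

-- the validation prologue of decode_matrix: none = an exception is raised (ZeroDivisionError / ValueError)
def pvComputeLA (input_bytes : List Int) (m_fil : Int) (n_col : Int) (l : Option Int) : Option Int :=
  match l with
  | some l0 => some l0
  | none =>
    let N := 256 * m_fil * n_col
    if N = 0 then none
    else
      let q := PySem.Int.floordiv (8 * (input_bytes.length : Int)) N
      let r := PySem.Int.mod (8 * (input_bytes.length : Int)) N
      if r ≠ 0 then none
      else if 256 * q * m_fil * n_col > 8 * (input_bytes.length : Int) then none
      else some q

-- chunking + the m_fil × n_col decode loops; range(0, len, chunk_length) raises ValueError when the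
-- step is 0 (unreachable under Pre_)
def pvBodyA (input_bytes : List Int) (m_fil : Int) (n_col : Int) (lv : Int) : List (List (List Int)) :=
  let chunk_length := 32 * lv
  if chunk_length = 0 then []
  else
    let byte_chunks := (PySem.List.pyRange 0 (input_bytes.length : Int) chunk_length).map
      (fun i => PySem.List.slice input_bytes (some i) (some (i + chunk_length)))
    (List.range m_fil.toNat).map (fun (i : ℕ) =>
      (List.range n_col.toNat).map (fun (j : ℕ) =>
        pvDecodeA (PySem.List.pyGetD byte_chunks ((n_col * (i : Int)) + (j : Int)) []) lv))

def decode_matrix (input_bytes : List Int) (m_fil : Int) (n_col : Int) (l : Option Int) : List (List (List Int)) :=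
  match pvComputeLA input_bytes m_fil n_col l with
  | none => []
  | some lv => pvBodyA input_bytes m_fil n_col lv

-- ===== PORT B =====

-- Source B's validation: total_bits // groups, with the two error tests folded into one 'or'
-- (none = the ValueError / ZeroDivisionError is raised)
def pvCheckB (input_bytes : List Int) (m_fil : Int) (n_col : Int) (l : Option Int) : Option Int :=
  match l with
  | some l0 => some l0
  | none =>
    let total_bits : Int := 8 * (input_bytes.length : Int)
    let groups : Int := 256 * m_fil * n_col
    if groups = 0 then none
    else
      let lv := PySem.Int.floordiv total_bits groups
      if PySem.Int.mod total_bits groups ≠ 0 ∨ 256 * lv * m_fil * n_col > total_bits then none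
      else some lv

-- prefix / X / mask / flat / the reshape comprehension, exactly as in Source B
def pvFlatB (input_bytes : List Int) (m_fil : Int) (n_col : Int) (lv : Int) : List Int :=
  let pref := PySem.List.slice input_bytes none (some (32 * lv * m_fil * n_col))
  let X : Int := pref.foldr (fun b acc => b + 256 * acc) 0
  let mask : Int := ((1 <<< lv.toNat : ℕ) : Int) - 1
  (List.range (256 * m_fil * n_col).toNat).map (fun k => PySem.Int.band (X >>> (k * lv.toNat)) mask)

def decode_matrix_alt (input_bytes : List Int) (m_fil : Int) (n_col : Int) (l : Option Int) : List (List (List Int)) :=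
  match pvCheckB input_bytes m_fil n_col l with
  | none => []
  | some lv =>
    -- trivial sizes: no chunk holds any data
    if m_fil ≤ 0 ∨ n_col ≤ 0 then (List.range m_fil.toNat).map (fun _ => ([] : List (List Int)))
    else
      let flat := pvFlatB input_bytes m_fil n_col lv
      (List.range m_fil.toNat).map (fun (i : ℕ) =>
        (List.range n_col.toNat).map (fun (j : ℕ) =>
          PySem.List.slice flat (some ((n_col * (i : Int) + (j : Int)) * 256))
            (some ((n_col * (i : Int) + (j : Int) + 1) * 256))))

-- ===== PRECONDITION & SPEC =====
-- Pre_ = the inputs on which the Python A returns normally, minus inputs whose used byte prefix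
-- holds a value outside 0..255: there format(byte,'08b') yields more than 8 bits, so A returns an
-- accidental misaligned decode (an artefact of its bit-string build), while B's bytes() conversion
-- raises ValueError; B's natural algorithm raises there, so those inputs are excluded.
def Pre_decode_matrix (input_bytes : List Int) (m_fil : Int) (n_col : Int) (l : Option Int) : Prop :=
  if l.isNone then
    m_fil ≠ 0 ∧ n_col ≠ 0 ∧ input_bytes ≠ [] ∧
      PySem.Int.mod (8 * (input_bytes.length : Int)) (256 * m_fil * n_col) = 0 ∧
      (0 < m_fil → 0 < n_col → ∀ b ∈ input_bytes, 0 ≤ b ∧ b < 256)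
  else
    if 0 < m_fil ∧ 0 < n_col then
      0 < l.getD 0 ∧ 32 * l.getD 0 * m_fil * n_col ≤ (input_bytes.length : Int) ∧
        ∀ b ∈ input_bytes.take (32 * l.getD 0 * m_fil * n_col).toNat, 0 ≤ b ∧ b < 256
    else l.getD 0 ≠ 0

instance (input_bytes : List Int) (m_fil : Int) (n_col : Int) (l : Option Int) : Decidable (Pre_decode_matrix input_bytes m_fil n_col l) := by unfold Pre_decode_matrix; infer_instance

def pvWitness_decode_matrix : List Int × Int × Int × Option Int :=
  ([1, 2, 3, 4, 5, 6, 7, 8, 9, 10, 11, 12, 13, 14, 15, 16,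
    17, 18, 19, 20, 21, 22, 23, 24, 25, 26, 27, 28, 29, 30, 31, 255], 1, 1, none)

def Spec_decode_matrix (input_bytes : List Int) (m_fil : Int) (n_col : Int) (l : Option Int) (out : List (List (List Int))) : Prop := out = decode_matrix_alt input_bytes m_fil n_col l
instance (input_bytes : List Int) (m_fil : Int) (n_col : Int) (l : Option Int) (out : List (List (List Int))) : Decidable (Spec_decode_matrix input_bytes m_fil n_col l out) := by unfold Spec_decode_matrix; infer_instance

-- ===== CLAIM (what is proved, stated in full; the proofs are below) =====
def Claim_equal_decode_matrix : Prop := ∀ (input_bytes : List Int) (m_fil : Int) (n_col : Int) (l : Option Int), Dom_decode_matrix input_bytes m_fil n_col l → Pre_decode_matrix input_bytes m_fil n_col l → Spec_decode_matrix input_bytes m_fil n_col l (decode_matrix input_bytes m_fil n_col l)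

-- ===== LEMMAS AND PROOFS =====

-- the little-endian integer of a byte list, named for the proofs
def pvX (bs : List Int) : Int := bs.foldr (fun b acc => b + 256 * acc) 0

theorem pvX_nonneg (bs : List Int) (hb : ∀ b ∈ bs, 0 ≤ b ∧ b < 256) : 0 ≤ pvX bs := by
  induction bs with
  | nil => simp [pvX]
  | cons b bs ih =>
    have hb' := hb b (by simp)
    have := ih (fun x hx => hb x (by simp [hx]))
    simp only [pvX, List.foldr_cons] at *
    nlinarith

theorem pvX_lt (bs : List Int) (hb : ∀ b ∈ bs, 0 ≤ b ∧ b < 256) :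
    pvX bs < 256 ^ bs.length := by
  induction bs with
  | nil => simp [pvX]
  | cons b bs ih =>
    have hb' := hb b (by simp)
    have h1 := ih (fun x hx => hb x (by simp [hx]))
    simp only [pvX, List.foldr_cons, List.length_cons] at *
    have : (256:Int) ^ (bs.length + 1) = 256 * 256 ^ bs.length := by ring
    rw [this]; nlinarith

-- split of the little-endian integer at byte position k
theorem pvX_split (bs : List Int) (k : ℕ) :
    pvX bs = pvX (bs.take k) + 256 ^ (bs.take k).length * pvX (bs.drop k) := by
  induction bs generalizing k with
  | nil => simp [pvX]
  | cons b bs ih =>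
    cases k with
    | zero => simp [pvX]
    | succ k =>
      simp only [List.take_succ_cons, List.drop_succ_cons, List.length_cons]
      have := ih k
      simp only [pvX, List.foldr_cons] at *
      rw [this]; ring

theorem pvX_drop (bs : List Int) (k : ℕ) (hk : k ≤ bs.length)
    (hb : ∀ b ∈ bs.take k, 0 ≤ b ∧ b < 256) :
    pvX (bs.drop k) = pvX bs / 256 ^ k := by
  have hlen : (bs.take k).length = k := by simp [hk]
  have hsplit := pvX_split bs k
  rw [hlen] at hsplit
  have h0 : 0 ≤ pvX (bs.take k) := pvX_nonneg _ hb
  have h1 : pvX (bs.take k) < 256 ^ k := by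
    have := pvX_lt (bs.take k) hb; rwa [hlen] at this
  rw [hsplit, mul_comm, Int.add_mul_ediv_right _ _ (by positivity),
    Int.ediv_eq_zero_of_lt h0 h1, zero_add]

-- bit t of A's LSB-first bitstream is bit t of the chunk's little-endian integer
theorem pvBits_getD (bs : List Int) (hb : ∀ b ∈ bs, 0 ≤ b ∧ b < 256) (t : ℕ) :
    (pvBytes2bits bs).getD t 0 = pvX bs / 2 ^ t % 2 := by
  induction bs generalizing t with
  | nil => simp [pvBytes2bits, pvX]
  | cons b bs ih =>
    have hbb := hb b (by simp)
    have ih' := ih (fun x hx => hb x (by simp [hx]))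
    have hX : pvX (b :: bs) = b + 256 * pvX bs := by simp [pvX]
    have hlen8 : (pvBits8 b).length = 8 := by simp [pvBits8]
    rw [show pvBytes2bits (b :: bs) = pvBits8 b ++ pvBytes2bits bs from by
      simp [pvBytes2bits]]
    by_cases ht : t < 8
    · rw [List.getD_append _ _ _ _ (by omega)]
      have hget : (pvBits8 b).getD t 0 = b / 2 ^ t % 2 := by
        simp [pvBits8, List.getD_eq_getElem?_getD, List.getElem?_map,
          List.getElem?_range ht]
      rw [hget, hX]
      have h256 : (256 : Int) * pvX bs = 2 ^ (7 - t) * pvX bs * 2 * 2 ^ t := by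
        have e : (7 - t) + t + 1 = 8 := by omega
        have h2 : (2:Int) ^ (7 - t) * 2 * 2 ^ t = 2 ^ ((7 - t) + t + 1) := by ring
        have h3 : (2:Int) ^ (7 - t) * 2 * 2 ^ t = 256 := by rw [h2, e]; norm_num
        rw [← h3]; ring
      rw [h256]
      rw [show b + 2 ^ (7 - t) * pvX bs * 2 * 2 ^ t = b + (2 ^ (7 - t) * pvX bs * 2) * 2 ^ t from by ring]
      rw [Int.add_mul_ediv_right _ _ (by positivity)]
      rw [show b / 2 ^ t + 2 ^ (7 - t) * pvX bs * 2 = b / 2 ^ t + 2 * (2 ^ (7-t) * pvX bs) from by ring]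
      rw [Int.add_mul_emod_self_left]
    · rw [List.getD_append_right _ _ _ _ (by rw [hlen8]; omega), hlen8, ih', hX]
      have h1 : (2:Int) ^ t = 256 * 2 ^ (t - 8) := by
        rw [show (256:Int) = 2 ^ 8 from by norm_num, ← pow_add]
        congr 1; omega
      rw [h1, ← Int.ediv_ediv_of_nonneg (by norm_num)]
      congr 2
      rw [show (b : Int) + 256 * pvX bs = b + pvX bs * 256 from by ring,
        Int.add_mul_ediv_right _ _ (by norm_num), Int.ediv_eq_zero_of_lt (by omega) (by omega)]
      ring

theorem pvModDouble (Y P : Int) (hP : 0 < P) :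
    Y % P + Y / P % 2 * P = Y % (2 * P) := by
  have h4 : Y / (2 * P) = Y / P / 2 := by
    rw [mul_comm, Int.ediv_ediv_of_nonneg (by omega)]
  rw [Int.emod_def, Int.emod_def, Int.emod_def, h4]; ring

-- the sum of l bits starting at position s is an l-bit field extraction
theorem pvSumBits (X : Int) (s l : ℕ) :
    (List.range l).foldl (fun acc j => acc + X / 2 ^ (s + j) % 2 * 2 ^ j) 0
      = X / 2 ^ s % 2 ^ l := by
  induction l with
  | zero => simp
  | succ l ih =>
    rw [List.range_succ, List.foldl_append, ih]
    have h1 : X / 2 ^ (s + l) = X / 2 ^ s / 2 ^ l := by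
      rw [Int.ediv_ediv_of_nonneg (by positivity), ← pow_add]
    simp only [List.foldl_cons, List.foldl_nil, h1]
    rw [pvModDouble _ _ (by positivity)]
    ring_nf

-- Python's (x >> k) & ((1 << l) - 1) as floor-division and remainder, for x ≥ 0
theorem pvShiftMask (x : Int) (hx : 0 ≤ x) (k lN : ℕ) :
    PySem.Int.band (x >>> k) (((1 <<< lN : ℕ) : Int) - 1) = x / 2 ^ k % 2 ^ lN := by
  have hmask : ((1 <<< lN : ℕ) : Int) - 1 = ((2 ^ lN - 1 : ℕ) : Int) := by
    rw [Nat.one_shiftLeft]; push_cast [Nat.one_le_two_pow]; ring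
  have hsh : x >>> k = x / 2 ^ k := by
    rw [Int.shiftRight_eq_div_pow]; push_cast; rfl
  have hq : 0 ≤ x / 2 ^ k := Int.ediv_nonneg hx (by positivity)
  rw [hmask, hsh, PySem.Int.band_of_nonneg hq (by positivity)]
  rw [Int.toNat_natCast, Nat.and_two_pow_sub_one_eq_mod]
  rw [← Int.toNat_natCast (2 ^ lN), ← Int.toNat_emod (by omega) (by positivity)]
  push_cast
  rw [Int.toNat_of_nonneg (Int.emod_nonneg _ (by positivity))]

-- dropping an exact high multiple of 2^(s+u) does not change an l-bit field below it
theorem pvTrunc (x b : Int) (s u lN : ℕ) (hl : lN ≤ u) :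
    (x + 2 ^ (s + u) * b) / 2 ^ s % 2 ^ lN = x / 2 ^ s % 2 ^ lN := by
  have h1 : x + 2 ^ (s + u) * b = x + (2 ^ u * b) * 2 ^ s := by rw [pow_add]; ring
  rw [h1, Int.add_mul_ediv_right _ _ (by positivity : (0:Int) < 2 ^ s).ne']
  have h2 : (2:Int) ^ u * b = 2 ^ lN * (2 ^ (u - lN) * b) := by
    have hp : (2:Int) ^ lN * 2 ^ (u - lN) = 2 ^ u := by
      rw [← pow_add]; congr 1; omega
    calc (2:Int) ^ u * b = (2 ^ lN * 2 ^ (u - lN)) * b := by rw [hp]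
      _ = 2 ^ lN * (2 ^ (u - lN) * b) := by ring
  rw [h2, Int.add_mul_emod_self_left]

-- A's per-chunk decode as shift/mask on the chunk's little-endian integer
theorem pvDecode_eq (chunk : List Int) (lN : ℕ) (hlen : chunk.length = 32 * lN)
    (hb : ∀ b ∈ chunk, 0 ≤ b ∧ b < 256) :
    pvDecodeA chunk (lN : Int)
      = (List.range 256).map (fun t => pvX chunk / 2 ^ (t * lN) % 2 ^ lN) := by
  rw [pvDecodeA]
  rw [if_neg (by push_cast [hlen]; ring_nf; omega)]
  simp only [Int.toNat_natCast]
  apply List.map_congr_left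
  intro i _
  have hfun : (fun (acc : Int) (j : ℕ) => acc + (pvBytes2bits chunk).getD (i * lN + j) 0 * 2 ^ j)
      = fun acc j => acc + pvX chunk / 2 ^ (i * lN + j) % 2 * 2 ^ j := by
    funext acc j
    rw [pvBits_getD chunk hb]
  rw [hfun, pvSumBits]

-- the two validation prologues compute the same thing
theorem pvCheck_eq (ib : List Int) (m n : Int) (l : Option Int) :
    pvCheckB ib m n l = pvComputeLA ib m n l := by
  cases l with
  | some l0 => rfl
  | none =>
    simp only [pvCheckB, pvComputeLA]
    split_ifs with h1 h2 h3 h4 h5 <;> first | rfl | (exfalso; tauto)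

-- the (n_col*i+j)-th chunk of A's chunk list is the corresponding slice
theorem pvChunk_get (ib : List Int) (lN k : ℕ) (hl : 0 < lN)
    (hk : (k + 1) * (32 * lN) ≤ ib.length) :
    PySem.List.pyGetD
      ((PySem.List.pyRange 0 (ib.length : Int) (32 * (lN : Int))).map
        (fun i => PySem.List.slice ib (some i) (some (i + 32 * (lN : Int))))) ((k : Int)) []
      = (ib.drop (32 * lN * k)).take (32 * lN) := by
  have hs : (0:Int) < 32 * (lN : Int) := by positivity
  rw [PySem.List.pyRange_of_pos _ _ hs, List.map_map, PySem.List.pyGetD_natCast]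
  have hlenpos : (0:Int) < (ib.length : Int) := by
    have : 0 < ib.length := by nlinarith
    exact_mod_cast this
  rw [if_pos hlenpos]
  have hkM : k < (((ib.length : Int) - 0 + 32 * (lN : Int) - 1) / (32 * (lN : Int))).toNat := by
    have h1 : ((k : Int) + 1) * (32 * (lN : Int)) ≤ (ib.length : Int) := by exact_mod_cast hk
    have h2 : ((k : Int) + 1) ≤ ((ib.length : Int) - 0 + 32 * (lN : Int) - 1) / (32 * (lN : Int)) := by
      rw [Int.le_ediv_iff_mul_le hs]; omega
    omega
  rw [List.getD_eq_getElem?_getD, List.getElem?_map, List.getElem?_range hkM]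
  simp only [Option.map_some, Option.getD_some, Function.comp_apply]
  have harg : (0:Int) + 32 * (lN : Int) * (k : Int) = ((32 * lN * k : ℕ) : Int) := by push_cast; ring
  rw [harg, show (32 * (lN:Int)) = ((32 * lN : ℕ) : Int) from by push_cast; ring,
    PySem.List.slice_natCast_add ib (32 * lN * k) (32 * lN)]

-- a 256-wide slice of B's flat list, as a map over range 256
theorem pvFlat_slice (f : ℕ → Int) (N a : ℕ) (ha : (a + 1) * 256 ≤ N) :
    PySem.List.slice ((List.range N).map f) (some ((a : Int) * 256))
      (some (((a : Int) + 1) * 256)) = (List.range 256).map (fun t => f (a * 256 + t)) := by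
  have h1 : ((a : Int) * 256) = ((a * 256 : ℕ) : Int) := by push_cast; ring
  have h2 : (((a : Int) + 1) * 256) = ((a * 256 : ℕ) : Int) + ((256 : ℕ) : Int) := by push_cast; ring
  rw [h1, h2, PySem.List.slice_natCast_add]
  have ha' : a * 256 + 256 ≤ N := by omega
  apply List.ext_getElem
  · simp
    omega
  · intro t ht1 ht2
    simp only [List.length_take, List.length_drop, List.length_map, List.length_range] at ht1
    simp only [List.getElem_take, List.getElem_drop, List.getElem_map, List.getElem_range]

-- the central per-coefficient identity: bit field (a*256+t) of the prefix integer equals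
-- bit field t of chunk a's integer
theorem pvField_eq (pre : List Int) (lN a t : ℕ) (hl : 0 < lN) (ht : t < 256)
    (hfit : 32 * lN * (a + 1) ≤ pre.length)
    (hb : ∀ b ∈ pre, 0 ≤ b ∧ b < 256) :
    pvX pre / 2 ^ ((a * 256 + t) * lN) % 2 ^ lN
      = pvX ((pre.drop (32 * lN * a)).take (32 * lN)) / 2 ^ (t * lN) % 2 ^ lN := by
  have htakeb : ∀ b ∈ pre.take (32 * lN * a), 0 ≤ b ∧ b < 256 :=
    fun b hbm => hb b (List.mem_of_mem_take hbm)
  have hfit' : 32 * lN * a + 32 * lN ≤ pre.length := by nlinarith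
  have hka : 32 * lN * a ≤ pre.length := by omega
  -- step 1: divide out the a whole chunks
  have hdrop := pvX_drop pre (32 * lN * a) hka htakeb
  set D := pre.drop (32 * lN * a) with hD
  have hsplitexp : (2:Int) ^ ((a * 256 + t) * lN) = 256 ^ (32 * lN * a) * 2 ^ (t * lN) := by
    rw [show (256:Int) = 2 ^ 8 from by norm_num, ← pow_mul, ← pow_add]
    congr 1; ring
  have hstep1 : pvX pre / 2 ^ ((a * 256 + t) * lN) = pvX D / 2 ^ (t * lN) := by
    rw [hsplitexp,
      ← Int.ediv_ediv_of_nonneg (show (0:Int) ≤ 256 ^ (32 * lN * a) by positivity), ← hdrop]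
  -- step 2: truncate D to its first 32*lN bytes
  have hDlen : 32 * lN ≤ D.length := by
    rw [hD, List.length_drop]; omega
  have hsplit := pvX_split D (32 * lN)
  have hDtl : (D.take (32 * lN)).length = 32 * lN := by
    rw [List.length_take]; omega
  rw [hDtl] at hsplit
  have hle : t * lN + lN ≤ 256 * lN := by nlinarith
  have h256 : (256:Int) ^ (32 * lN) = 2 ^ (t * lN + (256 * lN - t * lN)) := by
    rw [show (256:Int) = 2 ^ 8 from by norm_num, ← pow_mul]
    congr 1
    omega
  rw [hstep1, hsplit, h256, pvTrunc _ _ _ _ _ (by omega)]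

-- main case: both bodies, positive dimensions
theorem pvBody_eq (ib : List Int) (mN nN lN : ℕ) (_hm : 0 < mN) (_hn : 0 < nN) (hl : 0 < lN)
    (hlen : 32 * lN * mN * nN ≤ ib.length)
    (hb : ∀ b ∈ ib.take (32 * lN * mN * nN), 0 ≤ b ∧ b < 256) :
    pvBodyA ib (mN : Int) (nN : Int) (lN : Int)
      = (List.range (mN : Int).toNat).map (fun (i : ℕ) =>
          (List.range (nN : Int).toNat).map (fun (j : ℕ) =>
            PySem.List.slice (pvFlatB ib (mN : Int) (nN : Int) (lN : Int))
              (some (((nN : Int) * (i : Int) + (j : Int)) * 256))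
              (some (((nN : Int) * (i : Int) + (j : Int) + 1) * 256)))) := by
  -- set up B's flat list in analysed form
  set pre := ib.take (32 * lN * mN * nN) with hpre
  have hprelen : pre.length = 32 * lN * mN * nN := by
    rw [hpre, List.length_take]; omega
  have hXpre : 0 ≤ pvX pre := pvX_nonneg _ hb
  have hflat : pvFlatB ib (mN : Int) (nN : Int) (lN : Int)
      = (List.range (256 * mN * nN)).map
          (fun k => pvX pre / 2 ^ (k * lN) % 2 ^ lN) := by
    rw [pvFlatB]
    have hbound : 32 * (lN:Int) * (mN:Int) * (nN:Int) = ((32 * lN * mN * nN : ℕ) : Int) := by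
      push_cast; ring
    rw [hbound, PySem.List.slice_to_natCast]
    have hNN : (256 * (mN:Int) * (nN:Int)).toNat = 256 * mN * nN := by
      rw [show 256 * (mN:Int) * (nN:Int) = ((256 * mN * nN : ℕ) : Int) from by push_cast; ring,
        Int.toNat_natCast]
    rw [hNN]
    apply List.map_congr_left
    intro k _
    simp only [Int.toNat_natCast]
    have hfold : List.foldr (fun b acc => b + 256 * acc) 0 pre = pvX pre := rfl
    rw [hfold, pvShiftMask (pvX pre) hXpre (k * lN) lN]
  rw [hflat, pvBodyA]
  simp only [Int.toNat_natCast]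
  rw [if_neg (by positivity)]
  apply List.map_congr_left
  intro i hi
  apply List.map_congr_left
  intro j hj
  rw [List.mem_range] at hi hj
  set K : ℕ := nN * i + j with hK
  have hKlt : K + 1 ≤ mN * nN := by
    calc K + 1 = nN * i + (j + 1) := by omega
      _ ≤ nN * i + nN := by omega
      _ = nN * (i + 1) := by ring
      _ ≤ nN * mN := Nat.mul_le_mul_left _ hi
      _ = mN * nN := Nat.mul_comm _ _
  have hkfit : (K + 1) * (32 * lN) ≤ ib.length := by
    calc (K + 1) * (32 * lN) ≤ (mN * nN) * (32 * lN) := Nat.mul_le_mul_right _ hKlt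
      _ = 32 * lN * mN * nN := by ring
      _ ≤ ib.length := hlen
  have hidx : (nN : Int) * (i : Int) + (j : Int) = ((K : ℕ) : Int) := by rw [hK]; push_cast; ring
  rw [hidx, pvChunk_get ib lN K hl hkfit]
  -- the A chunk from ib equals the chunk from pre
  have hfit2 : 32 * lN * K + 32 * lN ≤ 32 * lN * mN * nN := by nlinarith
  have hfitpre : 32 * lN * (K + 1) ≤ pre.length := by rw [hprelen]; nlinarith
  have hchunk : (ib.drop (32 * lN * K)).take (32 * lN)
      = (pre.drop (32 * lN * K)).take (32 * lN) := by
    rw [hpre, List.drop_take]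
    rw [List.take_take]
    congr 1
    omega
  rw [hchunk]
  set chunk := (pre.drop (32 * lN * K)).take (32 * lN) with hchdef
  have hchlen : chunk.length = 32 * lN := by
    rw [hchdef, List.length_take, List.length_drop]
    omega
  have hchb : ∀ b ∈ chunk, 0 ≤ b ∧ b < 256 := by
    intro b hbm
    rw [hchdef] at hbm
    exact hb b (List.mem_of_mem_drop (List.mem_of_mem_take hbm))
  rw [pvDecode_eq chunk lN hchlen hchb]
  -- B's slice of flat
  have hKfitN : (K + 1) * 256 ≤ 256 * mN * nN := by nlinarith
  rw [pvFlat_slice (fun k => pvX pre / 2 ^ (k * lN) % 2 ^ lN) (256 * mN * nN) K hKfitN]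
  apply List.map_congr_left
  intro t htm
  rw [List.mem_range] at htm
  exact (pvField_eq pre lN K t hl htm (by omega) hb).symm

-- degenerate case: a non-positive dimension makes A's loops produce the same empty shape as
-- B's early return
theorem pvBodyA_degen (ib : List Int) (m n lv : Int) (hl : lv ≠ 0) (hmn : ¬ (0 < m ∧ 0 < n)) :
    pvBodyA ib m n lv = (List.range m.toNat).map (fun _ => ([] : List (List Int))) := by
  rw [pvBodyA]
  rw [if_neg (by omega)]
  by_cases hm : 0 < m
  · have hn : n.toNat = 0 := by omega
    simp [hn]
  · have hm0 : m.toNat = 0 := by omega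
    simp [hm0]

-- ===== VERDICT (by name: the statement is the Claim_ definition above) =====
theorem decode_matrix_spec : Claim_equal_decode_matrix := by
  intro ib m n l hdom hpre
  unfold Spec_decode_matrix
  rw [decode_matrix, decode_matrix_alt, pvCheck_eq]
  cases hL : pvComputeLA ib m n l with
  | none => rfl
  | some lv =>
    cases l with
    | some l0 =>
      have hlv : l0 = lv := by simpa [pvComputeLA] using hL
      subst hlv
      simp only [Pre_decode_matrix, Option.isNone_some, Bool.false_eq_true, if_false,
        Option.getD_some] at hpre
      simp only []
      by_cases hmn : 0 < m ∧ 0 < n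
      · rw [if_pos hmn] at hpre
        obtain ⟨hl, hlen, hb⟩ := hpre
        obtain ⟨hm', hn'⟩ := hmn
        rw [if_neg (by omega)]
        lift m to ℕ using hm'.le with mN
        lift n to ℕ using hn'.le with nN
        lift l0 to ℕ using hl.le with lN
        have hcast : (32 * (lN : Int) * (mN : Int) * (nN : Int)) = ((32 * lN * mN * nN : ℕ) : Int) := by
          push_cast; ring
        rw [hcast, Int.toNat_natCast] at hb
        exact pvBody_eq ib mN nN lN (by exact_mod_cast hm') (by exact_mod_cast hn')
          (by exact_mod_cast hl) (by rw [hcast] at hlen; exact_mod_cast hlen) hb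
      · rw [if_neg hmn] at hpre
        rw [if_pos (by omega)]
        exact pvBodyA_degen ib m n l0 hpre hmn
    | none =>
      simp only [Pre_decode_matrix, Option.isNone_none, if_true] at hpre
      obtain ⟨hm0, hn0, hib, hmod, hbytes⟩ := hpre
      have hN0 : (256 : Int) * m * n ≠ 0 := by
        intro h
        rcases mul_eq_zero.mp h with h' | h'
        · rcases mul_eq_zero.mp h' with h'' | h'' <;> omega
        · omega
      have hq := PySem.Int.floordiv_mul_add_mod (8 * (ib.length : Int)) (256 * m * n)
      rw [hmod, add_zero] at hq
      set q := PySem.Int.floordiv (8 * (ib.length : Int)) (256 * m * n) with hqdef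
      have hgt : ¬ (256 * q * m * n > 8 * (ib.length : Int)) := by
        have h1 : 256 * q * m * n = q * (256 * m * n) := by ring
        rw [h1, hq]
        exact lt_irrefl _
      have hlv : q = lv := by
        simp only [pvComputeLA, ← hqdef, hmod, if_neg hN0, ne_eq, not_true_eq_false,
          if_neg hgt, reduceIte, Option.some.injEq] at hL
        exact hL
      subst hlv
      have hlenpos : 0 < (ib.length : Int) := by
        have : ib.length ≠ 0 := fun h => hib (List.eq_nil_of_length_eq_zero h)
        omega
      simp only []
      by_cases hmn : 0 < m ∧ 0 < n
      · obtain ⟨hm, hn⟩ := hmn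
        rw [if_neg (by omega)]
        have hNpos : (0 : Int) < 256 * m * n := by positivity
        have hqpos : 0 < q := by nlinarith
        have hlen : 32 * q * m * n ≤ (ib.length : Int) := by nlinarith
        lift m to ℕ using hm.le with mN
        lift n to ℕ using hn.le with nN
        lift q to ℕ using hqpos.le with lN
        have hcast : (32 * (lN : Int) * (mN : Int) * (nN : Int)) = ((32 * lN * mN * nN : ℕ) : Int) := by
          push_cast; ring
        exact pvBody_eq ib mN nN lN (by exact_mod_cast hm) (by exact_mod_cast hn)
          (by exact_mod_cast hqpos) (by rw [hcast] at hlen; exact_mod_cast hlen)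
          (fun b hbm => hbytes (by exact_mod_cast hm) (by exact_mod_cast hn) b
            (List.mem_of_mem_take hbm))
      · have hq0 : q ≠ 0 := by
          intro h
          rw [h, zero_mul] at hq
          omega
        rw [if_pos (by omega)]
        exact pvBodyA_degen ib m n q hq0 hmn
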